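-- pv_equiv track=rewrite | github.com/yang12345670/DeepSearch-Agent | scripts/eval_answer_offline.py | match_samples
-- ===== SOURCE A (Python) =====
-- from typing import Any, Dict, List, Optional, Tuple
--
-- def match_samples(
--     benchmark: Dict[str, Dict],
--     predictions: Dict[str, Dict],
-- ) -> Tuple[List[Tuple[Dict, Dict]], List[str], List[str]]:
--     """Join benchmark and predictions by id."""
--     matched = []
--     b_ids = set(benchmark.keys())
--     p_ids = set(predictions.keys())
--
--     for sid in sorted(b_ids & p_ids):
--         matched.append((benchmark[sid], predictions[sid]))
--
--     unmatched_bench = sorted(b_ids - p_ids)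
--     unmatched_pred = sorted(p_ids - b_ids)
--     return matched, unmatched_bench, unmatched_pred
-- ===== SOURCE B (Python) =====
-- def match_samples(benchmark, predictions):
--     """Join benchmark and predictions by id: one classifying pass over the sorted union of ids."""
--     matched = []
--     unmatched_bench = []
--     unmatched_pred = []
--     for sid in sorted(set(benchmark) | set(predictions)):
--         if sid in benchmark:
--             if sid in predictions:
--                 matched.append((benchmark[sid], predictions[sid]))
--             else:
--                 unmatched_bench.append(sid)
--         else:
--             unmatched_pred.append(sid)
--     return matched, unmatched_bench, unmatched_pred
-- ===== Notes on version B (the rewrite author's own statement) =====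
-- stated objective: alternative
-- what changed: Instead of three separate set operations (intersection and two differences) each sorted independently, B sorts the union of ids once and classifies each id into matched/unmatched_bench/unmatched_pred in a single pass.
import Mathlib
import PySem

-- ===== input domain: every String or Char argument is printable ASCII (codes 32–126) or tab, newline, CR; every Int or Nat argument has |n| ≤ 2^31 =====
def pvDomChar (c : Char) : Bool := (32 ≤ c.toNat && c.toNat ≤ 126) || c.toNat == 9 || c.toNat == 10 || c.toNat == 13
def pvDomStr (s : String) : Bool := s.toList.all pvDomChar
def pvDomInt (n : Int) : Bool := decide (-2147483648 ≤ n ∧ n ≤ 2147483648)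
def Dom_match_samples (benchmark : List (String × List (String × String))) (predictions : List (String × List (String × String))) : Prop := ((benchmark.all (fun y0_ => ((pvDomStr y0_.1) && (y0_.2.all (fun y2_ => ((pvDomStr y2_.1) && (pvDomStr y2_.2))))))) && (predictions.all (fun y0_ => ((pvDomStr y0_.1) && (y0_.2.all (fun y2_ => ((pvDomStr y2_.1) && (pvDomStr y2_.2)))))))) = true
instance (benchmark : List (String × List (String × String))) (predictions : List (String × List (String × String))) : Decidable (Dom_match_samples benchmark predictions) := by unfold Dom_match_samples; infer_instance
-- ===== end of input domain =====

-- B replaces A's three set operations (intersection and two differences, each sorted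
-- separately) by a single classifying pass over the sorted union of the ids (alternative
-- decomposition, same asymptotic cost).

-- ===== PORT A =====
def match_samples (benchmark : List (String × List (String × String))) (predictions : List (String × List (String × String))) : (List ((List (String × String)) × (List (String × String)))) × List String × List String :=
  let bd := PySem.Dict.ofList benchmark
  let pd := PySem.Dict.ofList predictions
  let b_ids : PySem.Set String := PySem.Set.ofList bd.keys
  let p_ids : PySem.Set String := PySem.Set.ofList pd.keys
  let matched := (PySem.List.sorted (PySem.Set.inter b_ids p_ids) (fun x => x) false).foldl
      (fun acc sid => acc ++ [(bd.getD sid [], pd.getD sid [])]) []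
  let unmatched_bench := PySem.List.sorted (PySem.Set.diff b_ids p_ids) (fun x => x) false
  let unmatched_pred := PySem.List.sorted (PySem.Set.diff p_ids b_ids) (fun x => x) false
  (matched, unmatched_bench, unmatched_pred)

-- ===== PORT B =====
def match_samples_alt (benchmark : List (String × List (String × String))) (predictions : List (String × List (String × String))) : (List ((List (String × String)) × (List (String × String)))) × List String × List String :=
  let bd := PySem.Dict.ofList benchmark
  let pd := PySem.Dict.ofList predictions
  (PySem.List.sorted (PySem.Set.union (PySem.Set.ofList bd.keys) pd.keys) (fun x => x) false).foldl
    (fun acc sid =>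
      if bd.contains sid then
        if pd.contains sid then (acc.1 ++ [(bd.getD sid [], pd.getD sid [])], acc.2.1, acc.2.2)
        else (acc.1, acc.2.1 ++ [sid], acc.2.2)
      else (acc.1, acc.2.1, acc.2.2 ++ [sid]))
    ([], [], [])

-- ===== PRECONDITION & SPEC =====
def Spec_match_samples (benchmark : List (String × List (String × String))) (predictions : List (String × List (String × String))) (out : (List ((List (String × String)) × (List (String × String)))) × List String × List String) : Prop := out = match_samples_alt benchmark predictions
instance (benchmark : List (String × List (String × String))) (predictions : List (String × List (String × String))) (out : (List ((List (String × String)) × (List (String × String)))) × List String × List String) : Decidable (Spec_match_samples benchmark predictions out) := by unfold Spec_match_samples; infer_instance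

-- ===== CLAIM (what is proved, stated in full; the proofs are below) =====
def Claim_equal_match_samples : Prop := ∀ (benchmark : List (String × List (String × String))) (predictions : List (String × List (String × String))), Dom_match_samples benchmark predictions → Spec_match_samples benchmark predictions (match_samples benchmark predictions)

-- ===== LEMMAS AND PROOFS =====

-- A's 'for sid in …: matched.append(…)' loop is map.
theorem foldl_append_singleton_map {α β : Type} (l : List α) (f : α → β) (acc : List β) :
    l.foldl (fun acc x => acc ++ [f x]) acc = acc ++ l.map f := by
  induction l generalizing acc with
  | nil => simp
  | cons x t ih => simp [List.foldl, ih]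

-- B's classifying loop splits into three filters of the id list.
theorem foldl_classify {ν : Type}
    (bd pd : PySem.Dict String ν) (d₀ : ν) (l : List String)
    (m : List (ν × ν)) (ub up : List String) :
    l.foldl
      (fun acc sid =>
        if bd.contains sid then
          if pd.contains sid then (acc.1 ++ [(bd.getD sid d₀, pd.getD sid d₀)], acc.2.1, acc.2.2)
          else (acc.1, acc.2.1 ++ [sid], acc.2.2)
        else (acc.1, acc.2.1, acc.2.2 ++ [sid]))
      (m, ub, up)
    = (m ++ ((l.filter (fun s => bd.contains s && pd.contains s)).map
              (fun s => (bd.getD s d₀, pd.getD s d₀))),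
       ub ++ l.filter (fun s => bd.contains s && !pd.contains s),
       up ++ l.filter (fun s => !bd.contains s)) := by
  induction l generalizing m ub up with
  | nil => simp
  | cons x t ih =>
    by_cases hb : bd.contains x = true <;> by_cases hp : pd.contains x = true <;>
      simp [List.foldl, hb, hp, ih]

-- sorting a sub-set of the ids equals filtering the sorted union.
theorem sorted_subset_eq_filter_sorted_union
    (bk pk : List String) (S : List String) (q : String → Bool)
    (hS : S.Nodup)
    (hmem : ∀ s, s ∈ S ↔ ((s ∈ bk ∨ s ∈ pk) ∧ q s = true)) :
    PySem.List.sorted S (fun x => x) false =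
      (PySem.List.sorted (PySem.Set.union (PySem.Set.ofList bk) pk) (fun x => x) false).filter q := by
  have hUnodup : (PySem.List.sorted (PySem.Set.union (PySem.Set.ofList bk) pk) (fun x => x) false).Nodup :=
    (PySem.List.sorted_perm _ _ _).nodup_iff.mpr
      (PySem.Set.nodup_union _ pk (PySem.Set.nodup_ofList bk))
  have hUlt : (PySem.List.sorted (PySem.Set.union (PySem.Set.ofList bk) pk) (fun x => x) false).Pairwise (· < ·) := by
    have hle := PySem.List.sorted_pairwise (PySem.Set.union (PySem.Set.ofList bk) pk) (fun x => x)
    exact (hle.and hUnodup).imp (fun h => lt_of_le_of_ne h.1 h.2)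
  apply PySem.List.sorted_eq_of_perm_of_pairwise_lt
  · refine (List.perm_ext_iff_of_nodup (hUnodup.filter q) hS).mpr ?_
    intro a
    simp only [List.mem_filter, PySem.List.mem_sorted, PySem.Set.mem_union,
      PySem.Set.mem_ofList, hmem]
  · exact hUlt.filter q
  
theorem match_samples_eq_alt (benchmark predictions : List (String × List (String × String))) :
    match_samples benchmark predictions = match_samples_alt benchmark predictions := by
  unfold match_samples match_samples_alt
  set bd := PySem.Dict.ofList benchmark with hbd
  set pd := PySem.Dict.ofList predictions with hpd
  simp only []
  rw [foldl_classify, foldl_append_singleton_map]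
  have hc : ∀ (d : PySem.Dict String (List (String × String))) s,
      d.contains s = true ↔ s ∈ d.keys := fun d s => PySem.Dict.contains_iff_mem_keys d s
  refine Prod.ext ?_ (Prod.ext ?_ ?_)
  · simp only [List.nil_append]
    rw [sorted_subset_eq_filter_sorted_union bd.keys pd.keys _
        (fun s => bd.contains s && pd.contains s)
        (PySem.Set.nodup_inter _ _ (PySem.Set.nodup_ofList _))]
    intro s
    simp only [PySem.Set.mem_inter, PySem.Set.mem_ofList, Bool.and_eq_true, hc]
    tauto
  · simp only [List.nil_append]
    rw [sorted_subset_eq_filter_sorted_union bd.keys pd.keys _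
        (fun s => bd.contains s && !pd.contains s)
        (PySem.Set.nodup_diff _ _ (PySem.Set.nodup_ofList _))]
    intro s
    simp only [PySem.Set.mem_diff, PySem.Set.mem_ofList, Bool.and_eq_true, Bool.not_eq_true',
      ← Bool.not_eq_true, hc]
    tauto
  · simp only [List.nil_append]
    rw [sorted_subset_eq_filter_sorted_union bd.keys pd.keys _
        (fun s => !bd.contains s)
        (PySem.Set.nodup_diff _ _ (PySem.Set.nodup_ofList _))]
    intro s
    simp only [PySem.Set.mem_diff, PySem.Set.mem_ofList, Bool.not_eq_true', ← Bool.not_eq_true, hc]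
    tauto

-- ===== VERDICT (by name: the statement is the Claim_ definition above) =====
theorem match_samples_spec : Claim_equal_match_samples := by
  intro benchmark predictions _
  unfold Spec_match_samples
  exact match_samples_eq_alt benchmark predictions
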